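-- pv_equiv track=rewrite | github.com/jairoDO/octopusEnergyChallenge | flow/nem13/management/commands/validators.py | check_blocking_cycle
-- ===== SOURCE A (Python) =====
-- from functools import partial
-- from operator import eq, itemgetter
--
-- def check_blocking_cycle(data):
--     problems = []
--     if len(data) < 3:
--            problems.append("The flow does have the requirement flow")
--
--     column = [row[0] for row in data]
--
--     if column[0] != '100':
--         problems.append(f'The flow should start with code of Header Record but found{column[0]}')
--
--     if column[-1] != '900':
--         problems.append(f"The flow should end with code of End but found{data[-1]}")
--     record_identifier_unknown = list(filter(lambda value: value[1] not in ['100', '250', '500', '900'],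
--                                             enumerate(map(itemgetter(0), data), 1)))
--
--     if record_identifier_unknown:
--
--         problems.append(f"RecordIndicator unknown {','.join([ f'row:{index} value:{value}' for index, value in record_identifier_unknown])}")
--
--     if len(list(filter(partial(eq, '900'), column))) > 1:
--         problems.append(f'The flow should had one End Record')
--     return problems
-- ===== SOURCE B (Python) =====
-- from operator import itemgetter
--
-- VALID_CODES = ('100', '250', '500', '900')
--
-- def check_blocking_cycle(data):
--     # Inverted index: code -> list of 1-based row positions, built once.
--     positions = {}
--     for i, row in enumerate(data, 1):
--         positions.setdefault(row[0], []).append(i)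
--     problems = []
--     if len(data) < 3:
--         problems.append("The flow does have the requirement flow")
--     if data[0][0] != '100':
--         problems.append(f'The flow should start with code of Header Record but found{data[0][0]}')
--     if data[-1][0] != '900':
--         problems.append(f"The flow should end with code of End but found{data[-1]}")
--     bad = sorted(((i, c) for c, idxs in positions.items() if c not in VALID_CODES for i in idxs),
--                  key=itemgetter(0))
--     if bad:
--         problems.append("RecordIndicator unknown " + ','.join(f'row:{i} value:{c}' for i, c in bad))
--     if len(positions.get('900', [])) > 1:
--         problems.append('The flow should had one End Record')
--     return problems
-- ===== Notes on version B (the rewrite author's own statement) =====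
-- stated objective: alternative
-- what changed: A scans the rows separately for each check (a column comprehension, an enumerate/filter pass, a '900' count); B builds one inverted index code -> list of 1-based positions and answers the unknown-identifier check (flatten groups, sort by position) and the end-record count by reading the index, with first/last taken by direct indexing.
-- outside the precondition, e.g. on check_blocking_cycle([]): A raises IndexError, B raises IndexError; on check_blocking_cycle([['100'], [], ['900']]): A raises IndexError, B raises IndexError
import Mathlib
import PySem

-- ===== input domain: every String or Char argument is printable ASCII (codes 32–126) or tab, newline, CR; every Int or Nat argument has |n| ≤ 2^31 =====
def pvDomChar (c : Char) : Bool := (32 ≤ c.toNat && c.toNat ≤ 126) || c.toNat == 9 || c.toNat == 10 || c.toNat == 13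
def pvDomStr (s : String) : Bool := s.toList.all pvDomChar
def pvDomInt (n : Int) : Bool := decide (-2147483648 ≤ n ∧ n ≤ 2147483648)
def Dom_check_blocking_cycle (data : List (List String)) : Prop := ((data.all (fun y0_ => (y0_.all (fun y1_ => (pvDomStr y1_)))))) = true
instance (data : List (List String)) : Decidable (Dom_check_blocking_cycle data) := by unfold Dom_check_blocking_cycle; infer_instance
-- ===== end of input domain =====

-- B replaces A's per-check scans (column comprehension, enumerate/filter pass, '900'
-- count) by ONE inverted index code -> list of 1-based positions built once, from
-- which the unknown list (sorted by position) and the End-record count are read off;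
-- objective: alternative (a different data structure, same messages, same order).

-- shared formatting helper: Python repr of a string (exact on the printable-ASCII + tab/newline/CR domain),
-- as produced by f"{data[-1]}" on a list of strings in both A and B.
def pyReprStr (s : String) : String :=
  let cs := s.toList
  let q : Char := if cs.contains '\'' && !cs.contains '"' then '"' else '\''
  let esc := cs.flatMap (fun c =>
    if c = '\\' then ['\\', '\\']
    else if c = q then ['\\', q]
    else if c = '\n' then ['\\', 'n']
    else if c = '\t' then ['\\', 't']
    else if c = '\r' then ['\\', 'r']
    else [c])
  String.ofList (q :: esc ++ [q])

-- Python str() of a list of strings: "['a', 'b']"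
def pyReprRow (row : List String) : String :=
  "[" ++ String.intercalate ", " (row.map pyReprStr) ++ "]"

-- ===== PORT A =====
def check_blocking_cycle (data : List (List String)) : List String :=
  let problems : List String :=
    if data.length < 3 then ["The flow does have the requirement flow"] else []
  let column := data.map (fun row => (PySem.List.pyGet? row 0).getD "")
  let problems :=
    if (PySem.List.pyGet? column 0).getD "" ≠ "100" then
      problems ++ ["The flow should start with code of Header Record but found" ++
                   (PySem.List.pyGet? column 0).getD ""]
    else problems
  let problems :=
    if (PySem.List.pyGet? column (-1)).getD "" ≠ "900" then
      problems ++ ["The flow should end with code of End but found" ++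
                   pyReprRow ((PySem.List.pyGet? data (-1)).getD [])]
    else problems
  let record_identifier_unknown :=
    (PySem.List.enumerate column 1).filter
      (fun p => !(["100", "250", "500", "900"].contains p.2))
  let problems :=
    if record_identifier_unknown ≠ [] then
      problems ++ ["RecordIndicator unknown " ++
        String.intercalate ","
          (record_identifier_unknown.map
            (fun p => "row:" ++ PySem.Int.toStr p.1 ++ " value:" ++ p.2))]
    else problems
  let problems :=
    if (column.filter (fun v => "900" == v)).length > 1 then
      problems ++ ["The flow should had one End Record"]
    else problems
  problems

-- ===== PORT B =====
def check_blocking_cycle_alt (data : List (List String)) : List String :=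
  -- the index-building loop: for i, row in enumerate(data, 1): positions.setdefault(row[0], []).append(i)
  let positions :=
    ((PySem.List.enumerate data 1).map
        (fun p => ((PySem.List.pyGet? p.2 0).getD "", p.1))).foldl
      (fun d p => d.modify p.1 [] (· ++ [p.2])) PySem.Dict.empty
  let problems : List String :=
    if data.length < 3 then ["The flow does have the requirement flow"] else []
  let first := (PySem.List.pyGet? ((PySem.List.pyGet? data 0).getD []) 0).getD ""
  let problems :=
    if first ≠ "100" then
      problems ++ ["The flow should start with code of Header Record but found" ++ first]
    else problems
  let lastRow := (PySem.List.pyGet? data (-1)).getD []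
  let problems :=
    if (PySem.List.pyGet? lastRow 0).getD "" ≠ "900" then
      problems ++ ["The flow should end with code of End but found" ++ pyReprRow lastRow]
    else problems
  let bad :=
    PySem.List.sorted
      (positions.items.flatMap
        (fun q => if !(["100", "250", "500", "900"].contains q.1)
                  then q.2.map (fun i => (i, q.1)) else []))
      (fun p : Int × String => p.1)
  let problems :=
    if bad ≠ [] then
      problems ++ ["RecordIndicator unknown " ++
        String.intercalate ","
          (bad.map (fun p => "row:" ++ PySem.Int.toStr p.1 ++ " value:" ++ p.2))]
    else problems
  let problems :=
    if (positions.getD "900" []).length > 1 then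
      problems ++ ["The flow should had one End Record"]
    else problems
  problems

-- ===== PRECONDITION & SPEC =====
-- Pre_ excludes exactly the inputs where Python A raises IndexError
-- (empty data: column[0]; a row that is an empty list: row[0]).
def Pre_check_blocking_cycle (data : List (List String)) : Prop :=
  data ≠ [] ∧ ∀ row ∈ data, row ≠ []
instance (data : List (List String)) : Decidable (Pre_check_blocking_cycle data) := by
  unfold Pre_check_blocking_cycle; infer_instance

def pvWitness_check_blocking_cycle : List (List String) := [["100"], ["250", "x"], ["900"]]

def Spec_check_blocking_cycle (data : List (List String)) (out : List String) : Prop :=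
  out = check_blocking_cycle_alt data
instance (data : List (List String)) (out : List String) :
    Decidable (Spec_check_blocking_cycle data out) := by
  unfold Spec_check_blocking_cycle; infer_instance

-- ===== CLAIM (what is proved, stated in full; the proofs are below) =====
def Claim_equal_check_blocking_cycle : Prop :=
  ∀ (data : List (List String)), Dom_check_blocking_cycle data →
    Pre_check_blocking_cycle data →
    Spec_check_blocking_cycle data (check_blocking_cycle data)

-- ===== LEMMAS AND PROOFS =====

-- value of row[0] (with the port's default)
def row0 (row : List String) : String := (PySem.List.pyGet? row 0).getD ""

lemma getLast?_cons {α : Type} (d : α) (rest : List α) :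
    (d :: rest).getLast? = some (rest.getLast?.getD d) := by
  induction rest generalizing d with
  | nil => simp
  | cons e rest ih => rw [List.getLast?_cons_cons, ih e]; cases rest.getLast? <;> simp

lemma map_getLast? (d : List String) (rest : List (List String)) :
    ((d :: rest).map (fun r => (PySem.List.pyGet? r 0).getD "")).getLast? =
      some (row0 (rest.getLast?.getD d)) := by
  induction rest generalizing d with
  | nil => simp [row0]
  | cons e rest ih =>
      have h2 := ih e
      simp only [List.map_cons] at h2 ⊢
      rw [List.getLast?_cons_cons, h2, getLast?_cons, Option.getD_some]

lemma sum_map_eq_of_nodup {α : Type} [DecidableEq α] (l : List α) (h : α → Nat) (c : α)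
    (hl : l.Nodup) (hz : ∀ c' ∈ l, c' ≠ c → h c' = 0) :
    (l.map h).sum = if c ∈ l then h c else 0 := by
  induction l with
  | nil => simp
  | cons x xs ih =>
      simp only [List.map_cons, List.sum_cons, List.nodup_cons] at *
      rw [ih hl.2 (fun c' hc' => hz c' (List.mem_cons_of_mem _ hc'))]
      by_cases hxc : x = c
      · subst hxc
        simp [hl.1]
      · rw [hz x List.mem_cons_self hxc]
        by_cases hcm : c ∈ xs <;> simp [hcm, Ne.symm hxc]

lemma count_filter_eq (a : Int × String) (p : Int × String → Bool) (l : List (Int × String)) :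
    (l.filter p).count a = if p a then l.count a else 0 := by
  by_cases h : p a
  · simp [h, List.count_filter h]
  · simp only [h]
    refine List.count_eq_zero.mpr (fun hm => ?_)
    exact absurd (List.of_mem_filter hm) (by simp [h])

lemma flatMap_groups_perm (es : List (Int × String)) (P : String → Bool) :
    ((PySem.Set.ofList (es.map (·.2))).flatMap
        (fun c => if P c then es.filter (fun e => e.2 == c) else [])).Perm
      (es.filter (fun e => P e.2)) := by
  apply (List.perm_iff_count).mpr
  intro a
  rw [show ∀ (l : List String) (f : String → List (Int × String)),
        (l.flatMap f).count a = (l.map (fun c => (f c).count a)).sum from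
        fun l f => by simp [List.count, List.countP_flatMap, Function.comp_def]]
  rw [sum_map_eq_of_nodup _ _ a.2 (PySem.Set.nodup_ofList _)
        (fun c' _ hne => by
          split
          · exact (count_filter_eq a _ es).trans (by simp [Ne.symm hne])
          · simp)]
  rw [count_filter_eq]
  by_cases hmem : a.2 ∈ es.map (·.2)
  · simp only [PySem.Set.mem_ofList, hmem, if_true]
    split
    · rw [count_filter_eq]; simp
    · rfl
  · have hz : es.count a = 0 := by
      refine List.count_eq_zero.mpr (fun hm => hmem ?_)
      exact List.mem_map_of_mem hm
    simp [PySem.Set.mem_ofList, hmem, hz]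

lemma enumerate_map {α β : Type} (f : α → β) (xs : List α) (s : Int) :
    PySem.List.enumerate (xs.map f) s = (PySem.List.enumerate xs s).map (fun p => (p.1, f p.2)) := by
  induction xs generalizing s with
  | nil => simp [PySem.List.enumerate_nil]
  | cons x xs ih => simp [PySem.List.enumerate_cons, ih]

lemma inner_eq (data : List (List String)) (c : String) :
    (((((PySem.List.enumerate data 1).map
        (fun p => ((PySem.List.pyGet? p.2 0).getD "", p.1))).filter
        (fun p => p.1 == c)).map (·.2)).map (fun i => (i, c)))
    = (PySem.List.enumerate (data.map (fun row => (PySem.List.pyGet? row 0).getD "")) 1).filter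
        (fun e => e.2 == c) := by
  rw [enumerate_map, List.filter_map, List.filter_map, List.map_map, List.map_map]
  apply List.map_congr_left
  intro p hp
  have := List.of_mem_filter hp
  simp only [Function.comp] at this ⊢
  simp only [beq_iff_eq] at this
  simp [this]

lemma countP_enumerate_snd {A : Type} (q : A → Bool) (xs : List A) (s : Int) :
    List.countP (fun p : Int × A => q p.2) (PySem.List.enumerate xs s) = List.countP q xs := by
  induction xs generalizing s with
  | nil => simp [PySem.List.enumerate_nil]
  | cons x xs ih => simp [PySem.List.enumerate_cons, List.countP_cons, ih]

lemma count900_eq (data : List (List String)) :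
    (((((PySem.List.enumerate data 1).map
        (fun p => ((PySem.List.pyGet? p.2 0).getD "", p.1))).filter
        (fun p => p.1 == "900")).map (·.2)).length)
    = ((data.map (fun row => (PySem.List.pyGet? row 0).getD "")).filter
        (fun v => "900" == v)).length := by
  simp only [List.length_map, ← List.countP_eq_length_filter, List.countP_map]
  rw [show ((fun p : String × Int => p.1 == "900") ∘
        (fun p : Int × List String => ((PySem.List.pyGet? p.2 0).getD "", p.1)))
      = (fun p : Int × List String => ((PySem.List.pyGet? p.2 0).getD "" == "900")) from rfl,
    countP_enumerate_snd (fun r => ((PySem.List.pyGet? r 0).getD "" == "900")) data 1]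
  apply List.countP_congr
  intro r _
  simp only [Function.comp, beq_iff_eq]
  exact eq_comm

lemma bad_sorted_eq (data : List (List String)) :
    PySem.List.sorted
      (((((PySem.List.enumerate data 1).map
          (fun p => ((PySem.List.pyGet? p.2 0).getD "", p.1))).foldl
          (fun d p => d.modify p.1 [] (· ++ [p.2])) PySem.Dict.empty).items).flatMap
        (fun q => if !(["100", "250", "500", "900"].contains q.1)
                  then q.2.map (fun i => (i, q.1)) else []))
      (fun p : Int × String => p.1)
    = (PySem.List.enumerate (data.map (fun row => (PySem.List.pyGet? row 0).getD "")) 1).filter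
        (fun p => !(["100", "250", "500", "900"].contains p.2)) := by
  have hnodup := PySem.Dict.nodup_keys_foldl_modify_key
      ((PySem.List.enumerate data 1).map (fun p => ((PySem.List.pyGet? p.2 0).getD "", p.1)))
      (·.1) [] (fun _ p => (· ++ [p.2])) PySem.Dict.empty (by simp)
  rw [PySem.Dict.items_eq_map_keys _ hnodup [], List.flatMap_map]
  apply PySem.List.sorted_eq_of_perm_of_pairwise_lt
  · refine List.Perm.symm ?_
    have hkeys : ((((PySem.List.enumerate data 1).map
          (fun p => ((PySem.List.pyGet? p.2 0).getD "", p.1))).foldl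
          (fun d p => d.modify p.1 [] (· ++ [p.2])) PySem.Dict.empty)).keys
        = PySem.Set.ofList
            ((PySem.List.enumerate (data.map (fun row => (PySem.List.pyGet? row 0).getD "")) 1).map (·.2)) := by
      rw [PySem.Dict.keys_foldl_modify_key]
      simp only [PySem.Dict.keys_empty, PySem.Set.update_nil_left]
      congr 1
      rw [enumerate_map, List.map_map, List.map_map]
      rfl
    have heq :
        ((((PySem.List.enumerate data 1).map
            (fun p => ((PySem.List.pyGet? p.2 0).getD "", p.1))).foldl
            (fun d p => d.modify p.1 [] (· ++ [p.2])) PySem.Dict.empty)).keys.flatMap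
          (fun k => if !(["100", "250", "500", "900"].contains k)
              then ((((PySem.List.enumerate data 1).map
                  (fun p => ((PySem.List.pyGet? p.2 0).getD "", p.1))).foldl
                  (fun d p => d.modify p.1 [] (· ++ [p.2])) PySem.Dict.empty).getD k []).map
                  (fun i => (i, k))
              else [])
        = (PySem.Set.ofList
            ((PySem.List.enumerate (data.map (fun row => (PySem.List.pyGet? row 0).getD "")) 1).map (·.2))).flatMap
            (fun c => if !(["100", "250", "500", "900"].contains c)
              then (PySem.List.enumerate (data.map (fun row => (PySem.List.pyGet? row 0).getD "")) 1).filter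
                  (fun e => e.2 == c)
              else []) := by
      rw [hkeys]
      rw [List.flatMap_def, List.flatMap_def]
      congr 1
      apply List.map_congr_left
      intro c _
      rw [PySem.Dict.getD_foldl_modify_append]
      simp only [PySem.Dict.getD_empty, List.nil_append]
      rw [inner_eq data c]
    rw [heq]
    exact flatMap_groups_perm _ _
  · exact List.Pairwise.filter _ (PySem.List.pairwise_lt_enumerate _ _)

-- ===== VERDICT (by name: the statement is the Claim_ definition above) =====
theorem check_blocking_cycle_spec : Claim_equal_check_blocking_cycle := by
  intro data _hdom hpre
  obtain ⟨hne, _hrows⟩ := hpre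
  obtain ⟨d, rest, rfl⟩ : ∃ d rest, data = d :: rest := by
    cases data with
    | nil => exact absurd rfl hne
    | cons d rest => exact ⟨d, rest, rfl⟩
  show check_blocking_cycle (d :: rest) = check_blocking_cycle_alt (d :: rest)
  simp only [check_blocking_cycle, check_blocking_cycle_alt]
  rw [bad_sorted_eq (d :: rest)]
  rw [PySem.Dict.getD_foldl_modify_append]
  simp only [PySem.Dict.getD_empty, List.nil_append]
  rw [count900_eq (d :: rest)]
  have hlast : PySem.List.pyGet? ((d :: rest).map (fun r => (PySem.List.pyGet? r 0).getD "")) (-1)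
      = some (row0 (rest.getLast?.getD d)) := by
    rw [PySem.List.pyGet?_neg_one, map_getLast?]
  simp only [List.map_cons] at hlast
  have hlastD : PySem.List.pyGet? (d :: rest) (-1) = some (rest.getLast?.getD d) := by
    rw [PySem.List.pyGet?_neg_one, getLast?_cons]
  simp [hlast, hlastD, row0]
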